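-- pv_equiv track=rewrite | github.com/PVSPHANINDRA/ML_Algos | decisionTree.py | get_cat_values_map
-- ===== SOURCE A (Python) =====
-- def get_cat_values_map(instances, class_index, num_attr):
--     cat_attr_map = {}
--     for instance in instances:
--         for index in range(0, len(instance)):
--             if index == class_index or index in num_attr:
--                 continue
--             attr_value = instance[index]
--             if index not in cat_attr_map:
--                 cat_attr_map[index] = [attr_value]
--             else:
--                 attr_values = cat_attr_map[index]
--                 if attr_value not in attr_values:
--                     attr_values.append(attr_value)
--     return cat_attr_map
-- ===== SOURCE B (Python) =====
-- def get_cat_values_map(instances, class_index, num_attr):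
--     # Column-wise: find the widest row, then build each kept column's
--     # distinct-in-order value list in one comprehension per column.
--     width = max((len(instance) for instance in instances), default=0)
--     return {
--         i: list(dict.fromkeys(instance[i] for instance in instances if len(instance) > i))
--         for i in range(width)
--         if i != class_index and i not in num_attr
--     }
-- ===== Notes on version B (the rewrite author's own statement) =====
-- stated objective: faster
-- what changed: A mutates a dict row by row with an inner 'value not in list' scan per cell; B builds the result column-wise: max row width once, then for each kept column index collect that column's values from all sufficiently long rows and dedup them in one dict.fromkeys hash pass.
import Mathlib
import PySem

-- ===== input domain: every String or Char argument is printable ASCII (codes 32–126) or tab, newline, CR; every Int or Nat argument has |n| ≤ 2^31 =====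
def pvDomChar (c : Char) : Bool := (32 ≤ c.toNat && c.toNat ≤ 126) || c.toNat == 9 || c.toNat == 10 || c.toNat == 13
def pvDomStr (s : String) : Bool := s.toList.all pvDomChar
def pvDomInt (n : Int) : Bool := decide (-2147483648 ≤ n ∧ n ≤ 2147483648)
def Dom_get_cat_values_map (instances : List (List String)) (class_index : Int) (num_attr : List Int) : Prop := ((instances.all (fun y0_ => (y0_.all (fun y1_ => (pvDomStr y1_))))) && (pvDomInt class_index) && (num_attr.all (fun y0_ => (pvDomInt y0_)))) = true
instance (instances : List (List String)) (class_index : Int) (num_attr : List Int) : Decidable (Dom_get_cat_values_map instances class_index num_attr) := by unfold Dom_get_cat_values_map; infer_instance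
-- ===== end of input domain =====

-- B replaces A's row-by-row dict mutation with a column-wise build:
-- compute the max row width once, then one dedup ('dict.fromkeys') per kept column (objective: simpler).

-- the shared filter condition 'index == class_index or index in num_attr'
def pvSkip (class_index : Int) (num_attr : List Int) (i : Int) : Bool :=
  i == class_index || num_attr.contains i

-- ===== PORT A =====
-- the body of A's inner loop over 'index in range(0, len(instance))'
def pvProcIdx (class_index : Int) (num_attr : List Int) (inst : List String)
    (d : PySem.Dict Int (List String)) (index : Int) : PySem.Dict Int (List String) :=
  if pvSkip class_index num_attr index then d
  else
    match PySem.List.pyGet? inst index with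
    | none => d  -- unreachable: index ∈ range(0, len(instance))
    | some attr_value =>
      match d.get? index with
      | none => d.insert index [attr_value]
      | some attr_values =>
        if attr_values.contains attr_value then d
        else d.insert index (attr_values ++ [attr_value])

def get_cat_values_map (instances : List (List String)) (class_index : Int) (num_attr : List Int) : List (Int × List String) :=
  (instances.foldl
    (fun d inst =>
      (PySem.List.pyRange 0 (inst.length : Int) 1).foldl (pvProcIdx class_index num_attr inst) d)
    PySem.Dict.empty).items

-- ===== PORT B =====
-- width = max((len(instance) for instance in instances), default=0)
def pvWidth (instances : List (List String)) : Int :=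
  instances.foldl (fun m inst => max m (inst.length : Int)) 0

-- the generator 'instance[i] for instance in instances if len(instance) > i'
def pvCol (instances : List (List String)) (i : Int) : List String :=
  instances.filterMap (fun inst => if (inst.length : Int) > i then PySem.List.pyGet? inst i else none)

-- the dict comprehension over strictly increasing keys: its items appear in loop order
def get_cat_values_map_alt (instances : List (List String)) (class_index : Int) (num_attr : List Int) : List (Int × List String) :=
  (PySem.List.pyRange 0 (pvWidth instances) 1).filterMap (fun i =>
    if pvSkip class_index num_attr i then none
    else some (i, PySem.List.dedup (pvCol instances i)))

-- ===== PRECONDITION & SPEC =====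
def Spec_get_cat_values_map (instances : List (List String)) (class_index : Int) (num_attr : List Int) (out : List (Int × List String)) : Prop := out = get_cat_values_map_alt instances class_index num_attr
instance (instances : List (List String)) (class_index : Int) (num_attr : List Int) (out : List (Int × List String)) : Decidable (Spec_get_cat_values_map instances class_index num_attr out) := by unfold Spec_get_cat_values_map; infer_instance

-- ===== CLAIM (what is proved, stated in full; the proofs are below) =====
def Claim_equal_get_cat_values_map : Prop := ∀ (instances : List (List String)) (class_index : Int) (num_attr : List Int), Dom_get_cat_values_map instances class_index num_attr → Spec_get_cat_values_map instances class_index num_attr (get_cat_values_map instances class_index num_attr)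

-- ===== LEMMAS AND PROOFS =====

-- the dict held by A after the rows rsOld and then the first k indices of one further row,
-- where rsAll = rsOld ++ [that row]; W is pvWidth rsOld
def pvPart (ci : Int) (na : List Int) (rsOld rsAll : List (List String)) (k W : Int) : List (Int × List String) :=
  (PySem.List.pyRange 0 (max W k) 1).filterMap (fun i =>
    if pvSkip ci na i then none
    else some (i, PySem.List.dedup (if i < k then pvCol rsAll i else pvCol rsOld i)))

lemma pv_init_le_foldl (rs : List (List String)) (a : Int) :
    a ≤ rs.foldl (fun m inst => max m (inst.length : Int)) a := by
  induction rs generalizing a with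
  | nil => exact le_refl a
  | cons r rs ih =>
      exact le_trans (le_max_left a (r.length : Int)) (ih (max a (r.length : Int)))

lemma pv_width_nonneg (rs : List (List String)) : 0 ≤ pvWidth rs := pv_init_le_foldl rs 0

lemma pv_len_le_width (rs : List (List String)) (inst : List String) (h : inst ∈ rs) :
    (inst.length : Int) ≤ pvWidth rs := by
  unfold pvWidth
  generalize (0 : Int) = a
  induction rs generalizing a with
  | nil => cases h
  | cons r rs ih =>
      rcases List.mem_cons.mp h with h | h
      · subst h
        exact le_trans (le_max_right a (inst.length : Int))
          (pv_init_le_foldl rs (max a (inst.length : Int)))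
      · exact ih h _

lemma pv_col_nil (rs : List (List String)) (n : Int) (h : pvWidth rs ≤ n) :
    pvCol rs n = [] := by
  unfold pvCol
  rw [List.filterMap_eq_nil_iff]
  intro inst hm
  have := pv_len_le_width rs inst hm
  simp only [gt_iff_lt, if_neg (by omega : ¬ n < (inst.length : Int))]

lemma pv_width_snoc (rs : List (List String)) (r : List String) :
    pvWidth (rs ++ [r]) = max (pvWidth rs) (r.length : Int) := by
  simp [pvWidth, List.foldl_append]

lemma pv_col_snoc (rs : List (List String)) (r : List String) (i : Int) :
    pvCol (rs ++ [r]) i = pvCol rs i ++ pvCol [r] i := by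
  simp [pvCol]

lemma pv_dedup_snoc (xs : List String) (v : String) :
    PySem.List.dedup (xs ++ [v]) =
      if v ∈ xs then PySem.List.dedup xs else PySem.List.dedup xs ++ [v] := by
  have h1 : PySem.List.dedup (xs ++ [v]) = PySem.Set.add (PySem.List.dedup xs) v := by
    simp [PySem.List.dedup_eq_ofList, PySem.Set.ofList_eq_foldl, List.foldl_append]
  rw [h1]
  show (if (PySem.List.dedup xs).contains v then PySem.List.dedup xs
        else PySem.List.dedup xs ++ [v]) = _
  by_cases hv : v ∈ xs
  · rw [if_pos hv, if_pos (by simpa [PySem.List.mem_dedup] using hv)]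
  · rw [if_neg hv, if_neg (by simpa [PySem.List.mem_dedup] using hv)]

lemma pv_part_fst (ci : Int) (na : List Int) (l : List Int) (F : Int → List String) :
    ((l.filterMap (fun i => if pvSkip ci na i then none else some (i, F i))).map Prod.fst)
      = l.filter (fun i => !(pvSkip ci na i)) := by
  induction l with
  | nil => rfl
  | cons x l ih =>
      simp only [List.filterMap_cons, List.filter_cons]
      by_cases hx : pvSkip ci na x
      · simp [hx, ih]
      · simp [hx, ih]

lemma pv_get?_part (ci : Int) (na : List Int) (o a : List (List String)) (k W j : Int) :
    (PySem.Dict.mk (pvPart ci na o a k W)).get? j =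
      if pvSkip ci na j = false ∧ 0 ≤ j ∧ j < max W k then
        some (PySem.List.dedup (if j < k then pvCol a j else pvCol o j))
      else none := by
  have hkeys : (PySem.Dict.mk (pvPart ci na o a k W)).keys
      = (PySem.List.pyRange 0 (max W k) 1).filter (fun i => !(pvSkip ci na i)) := by
    show (pvPart ci na o a k W).map Prod.fst = _
    exact pv_part_fst ci na _ _
  have hnd : (PySem.Dict.mk (pvPart ci na o a k W)).keys.Nodup := by
    rw [hkeys]; exact (PySem.List.nodup_pyRange_one 0 (max W k)).filter _
  by_cases h : pvSkip ci na j = false ∧ 0 ≤ j ∧ j < max W k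
  · rw [if_pos h]
    refine PySem.Dict.get?_of_mem_items _ ?_ hnd
    show (j, _) ∈ pvPart ci na o a k W
    unfold pvPart
    refine List.mem_filterMap.mpr ⟨j, ?_, ?_⟩
    · rw [PySem.List.mem_pyRange_one]; omega
    · rw [if_neg (by simp [h.1])]
  · rw [if_neg h, PySem.Dict.get?_eq_none_iff_not_mem_keys, hkeys]
    intro hm
    rcases List.mem_filter.mp hm with ⟨hr, hs⟩
    rw [PySem.List.mem_pyRange_one] at hr
    simp only [Bool.not_eq_eq_eq_not, Bool.not_true] at hs
    exact h ⟨by simpa using hs, hr.1, hr.2⟩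

lemma pv_col_single (r : List String) (n : Nat) (hn : n < r.length) :
    pvCol [r] (n : Int) = [r[n]] := by
  simp [pvCol, PySem.List.pyGet?_natCast]
  simp [hn]

-- one step of A's inner loop on the canonical dict
lemma pv_step (ci : Int) (na : List Int) (rs : List (List String)) (r : List String)
    (n : Nat) (hn : n < r.length) :
    pvProcIdx ci na r (PySem.Dict.mk (pvPart ci na rs (rs ++ [r]) (n : Int) (pvWidth rs))) (n : Int)
      = PySem.Dict.mk (pvPart ci na rs (rs ++ [r]) ((n : Int) + 1) (pvWidth rs)) := by
  have hk0 : (0 : Int) ≤ (n : Int) := by positivity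
  have hW0 : 0 ≤ pvWidth rs := pv_width_nonneg rs
  set W := pvWidth rs with hWdef
  set k : Int := (n : Int) with hkdef
  have hcolA : pvCol (rs ++ [r]) k = pvCol rs k ++ [r[n]] := by
    rw [hkdef, pv_col_snoc, pv_col_single r n hn]
  unfold pvProcIdx
  by_cases hsk : pvSkip ci na k
  · -- skipped index: the dict is unchanged and so is the canonical list
    rw [if_pos hsk]
    apply PySem.Dict.ext
    show pvPart ci na rs (rs ++ [r]) k W = pvPart ci na rs (rs ++ [r]) (k + 1) W
    unfold pvPart
    by_cases hkW : k < W
    · rw [max_eq_left (by omega), max_eq_left (by omega)]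
      apply List.filterMap_congr
      intro i hi
      rw [PySem.List.mem_pyRange_one] at hi
      by_cases hsi : pvSkip ci na i
      · rw [if_pos hsi, if_pos hsi]
      · have hik : i ≠ k := by intro h; rw [h] at hsi; exact hsi hsk
        rw [if_neg hsi, if_neg hsi, if_congr (by omega : i < k ↔ i < k + 1) rfl rfl]
    · rw [max_eq_right (by omega : W ≤ k), max_eq_right (by omega : W ≤ k + 1),
        PySem.List.pyRange_one_succ_right (by omega), List.filterMap_append]
      have htail : List.filterMap (fun i =>
          if pvSkip ci na i then none
          else some (i, PySem.List.dedup (if i < k + 1 then pvCol (rs ++ [r]) i else pvCol rs i)))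
          [k] = [] := by
        simp [hsk]
      rw [htail, List.append_nil]
      apply List.filterMap_congr
      intro i hi
      rw [PySem.List.mem_pyRange_one] at hi
      by_cases hsi : pvSkip ci na i
      · rw [if_pos hsi, if_pos hsi]
      · rw [if_neg hsi, if_neg hsi,
          if_congr (by omega : i < k ↔ i < k + 1) rfl rfl]
  · rw [if_neg hsk]
    rw [Bool.not_eq_true] at hsk
    rw [hkdef, PySem.List.pyGet?_natCast, List.getElem?_eq_getElem hn, ← hkdef]
    rw [pv_get?_part]
    by_cases hkW : k < W
    · -- the key is already present, holding dedup (pvCol rs k)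
      rw [if_pos ⟨hsk, hk0, by omega⟩, if_neg (lt_irrefl k)]
      dsimp only
      have hcont : (PySem.List.dedup (pvCol rs k)).contains r[n] = true ↔ r[n] ∈ pvCol rs k := by
        simp
      by_cases hv : r[n] ∈ pvCol rs k
      · -- value already recorded: dict unchanged, dedup unchanged
        rw [show ((PySem.List.dedup (pvCol rs k)).contains r[n]) = true from hcont.mpr hv]
        show PySem.Dict.mk (pvPart ci na rs (rs ++ [r]) k W) = _
        apply PySem.Dict.ext
        show pvPart ci na rs (rs ++ [r]) k W = pvPart ci na rs (rs ++ [r]) (k + 1) W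
        unfold pvPart
        rw [max_eq_left (by omega), max_eq_left (by omega)]
        apply List.filterMap_congr
        intro i hi
        rw [PySem.List.mem_pyRange_one] at hi
        by_cases hsi : pvSkip ci na i
        · rw [if_pos hsi, if_pos hsi]
        · rw [if_neg hsi, if_neg hsi]
          by_cases hik : i = k
          · subst hik
            rw [if_neg (lt_irrefl k), if_pos (by omega : k < k + 1), hcolA,
              pv_dedup_snoc, if_pos hv]
          · rw [if_congr (by omega : i < k ↔ i < k + 1) rfl rfl]
      · -- new value appended to the existing list (overwrite keeps the position)
        rw [show ((PySem.List.dedup (pvCol rs k)).contains r[n]) = false from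
          (Bool.eq_false_iff).mpr (fun h => hv (hcont.mp h)), if_neg (by decide)]
        have hcontk : (PySem.Dict.mk (pvPart ci na rs (rs ++ [r]) k W)).contains k = true := by
          rw [PySem.Dict.contains_eq_isSome_get?, pv_get?_part ci na rs (rs ++ [r]) k W k,
            if_pos ⟨hsk, hk0, by omega⟩]
          rfl
        apply PySem.Dict.ext
        rw [PySem.Dict.items_insert_of_contains _ _ hcontk]
        show List.map _ (pvPart ci na rs (rs ++ [r]) k W) = pvPart ci na rs (rs ++ [r]) (k + 1) W
        unfold pvPart
        rw [max_eq_left (by omega), max_eq_left (by omega), List.map_filterMap]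
        apply List.filterMap_congr
        intro i hi
        rw [PySem.List.mem_pyRange_one] at hi
        by_cases hsi : pvSkip ci na i
        · rw [if_pos hsi, if_pos hsi]; rfl
        · rw [if_neg hsi, if_neg hsi]
          by_cases hik : i = k
          · subst hik
            rw [if_neg (lt_irrefl k), if_pos (by omega : k < k + 1), hcolA,
              pv_dedup_snoc, if_neg hv]
            simp
          · rw [if_congr (by omega : i < k ↔ i < k + 1) rfl rfl]
            simp [Option.map_some, hik]
    · -- fresh key: appended at the end of the items
      rw [if_neg (by omega : ¬ (pvSkip ci na k = false ∧ 0 ≤ k ∧ k < max W k))]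
      dsimp only
      have hcontk : (PySem.Dict.mk (pvPart ci na rs (rs ++ [r]) k W)).contains k = false := by
        rw [PySem.Dict.contains_eq_isSome_get?, pv_get?_part ci na rs (rs ++ [r]) k W k,
          if_neg (by omega : ¬ (pvSkip ci na k = false ∧ 0 ≤ k ∧ k < max W k))]
        rfl
      apply PySem.Dict.ext
      rw [PySem.Dict.items_insert_of_not_contains _ _ hcontk]
      show pvPart ci na rs (rs ++ [r]) k W ++ [(k, [r[n]])] = pvPart ci na rs (rs ++ [r]) (k + 1) W
      unfold pvPart
      rw [max_eq_right (by omega : W ≤ k), max_eq_right (by omega : W ≤ k + 1),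
        PySem.List.pyRange_one_succ_right (by omega), List.filterMap_append]
      have htail : List.filterMap (fun i =>
          if pvSkip ci na i then none
          else some (i, PySem.List.dedup (if i < k + 1 then pvCol (rs ++ [r]) i else pvCol rs i)))
          [k] = [(k, [r[n]])] := by
        have hnil : pvCol rs k = [] := pv_col_nil rs k (by omega)
        simp only [List.filterMap_cons, List.filterMap_nil, hsk, Bool.false_eq_true,
          if_false, if_pos (by omega : k < k + 1), hcolA, hnil, List.nil_append]
        rfl
      rw [htail]
      congr 1
      apply List.filterMap_congr
      intro i hi
      rw [PySem.List.mem_pyRange_one] at hi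
      by_cases hsi : pvSkip ci na i
      · rw [if_pos hsi, if_pos hsi]
      · rw [if_neg hsi, if_neg hsi,
          if_congr (by omega : i < k ↔ i < k + 1) rfl rfl]

-- A's inner loop over the first n indices of row r, started on the canonical dict for rs
lemma pv_inner (ci : Int) (na : List Int) (rs : List (List String)) (r : List String)
    (n : Nat) (hn : n ≤ r.length) :
    (PySem.List.pyRange 0 (n : Int) 1).foldl (pvProcIdx ci na r)
        (PySem.Dict.mk (pvPart ci na rs (rs ++ [r]) 0 (pvWidth rs)))
      = PySem.Dict.mk (pvPart ci na rs (rs ++ [r]) (n : Int) (pvWidth rs)) := by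
  induction n with
  | zero => rw [Nat.cast_zero, PySem.List.pyRange_one_eq_nil le_rfl]; rfl
  | succ m ih =>
      have h1 : ((m : Int) + 1) = ((m + 1 : Nat) : Int) := by push_cast; ring
      rw [← h1, PySem.List.pyRange_one_succ_right (by positivity), List.foldl_append,
        ih (by omega), List.foldl_cons, List.foldl_nil, pv_step ci na rs r m (by omega)]

-- the canonical dict for rs, with k = 0, has exactly B's items for rs
lemma pv_part_zero (ci : Int) (na : List Int) (rs a : List (List String)) :
    pvPart ci na rs a 0 (pvWidth rs) = get_cat_values_map_alt rs ci na := by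
  unfold pvPart get_cat_values_map_alt
  rw [max_eq_left (pv_width_nonneg rs)]
  apply List.filterMap_congr
  intro i hi
  rw [PySem.List.mem_pyRange_one] at hi
  rw [if_neg (by omega : ¬ i < 0)]

-- the canonical dict for rs ++ [r], with k = len r, has exactly B's items for rs ++ [r]
lemma pv_part_full (ci : Int) (na : List Int) (rs : List (List String)) (r : List String) :
    pvPart ci na rs (rs ++ [r]) ((r.length : Nat) : Int) (pvWidth rs)
      = get_cat_values_map_alt (rs ++ [r]) ci na := by
  unfold pvPart get_cat_values_map_alt
  rw [pv_width_snoc]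
  apply List.filterMap_congr
  intro i hi
  rw [PySem.List.mem_pyRange_one] at hi
  by_cases hik : i < (r.length : Int)
  · rw [if_pos hik]
  · rw [if_neg hik]
    have : pvCol (rs ++ [r]) i = pvCol rs i := by
      rw [pv_col_snoc]
      have : pvCol [r] i = [] := by
        simp only [pvCol, List.filterMap_cons, List.filterMap_nil, gt_iff_lt,
          if_neg (by omega : ¬ i < (r.length : Int))]
      rw [this, List.append_nil]
    rw [this]

lemma pv_outer (ci : Int) (na : List Int) (rs : List (List String)) :
    rs.foldl
        (fun d inst =>
          (PySem.List.pyRange 0 (inst.length : Int) 1).foldl (pvProcIdx ci na inst) d)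
        PySem.Dict.empty
      = PySem.Dict.mk (get_cat_values_map_alt rs ci na) := by
  induction rs using List.reverseRecOn with
  | nil =>
      apply PySem.Dict.ext
      show ([] : List (Int × List String)) = get_cat_values_map_alt [] ci na
      simp [get_cat_values_map_alt, pvWidth, PySem.List.pyRange_one_eq_nil]
  | append_singleton rs r ih =>
      rw [List.foldl_append, List.foldl_cons, List.foldl_nil, ih]
      rw [← pv_part_zero ci na rs (rs ++ [r])]
      rw [pv_inner ci na rs r r.length le_rfl]
      rw [pv_part_full]

-- ===== VERDICT (by name: the statement is the Claim_ definition above) =====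
theorem get_cat_values_map_spec : Claim_equal_get_cat_values_map := by
  intro instances class_index num_attr _
  show get_cat_values_map instances class_index num_attr = _
  unfold get_cat_values_map
  rw [pv_outer]
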